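-- pv_equiv track=rewrite | github.com/vezyldicode/The_Impossible_Key | assets/quizzes/Rules_Dictionary.py | check_consonant_cluster
-- ===== SOURCE A (Python) =====
-- def check_consonant_cluster(password):
--     """Phải có ít nhất một cụm 3 phụ âm liên tiếp"""
--     consonants = 'bcdfghjklmnpqrstvwxyzBCDFGHJKLMNPQRSTVWXYZ'
--     count = 0
--     max_count = 0
--     for c in password:
--         if c in consonants:
--             count += 1
--             max_count = max(max_count, count)
--         else:
--             count = 0
--     return max_count >= 3
-- ===== SOURCE B (Python) =====
-- def check_consonant_cluster(password):
--     """Phải có ít nhất một cụm 3 phụ âm liên tiếp"""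
--     consonants = 'bcdfghjklmnpqrstvwxyzBCDFGHJKLMNPQRSTVWXYZ'
--     flags = [c in consonants for c in password]
--     return any(a and b and c for a, b, c in zip(flags, flags[1:], flags[2:]))
-- ===== Notes on version B (the rewrite author's own statement) =====
-- stated objective: alternative
-- what changed: B works in two staged passes - first materialise the list of consonant flags, then zip it with its two shifted copies and test whether any length-3 window is all-consonant - instead of threading a running count and running maximum through one loop and comparing the maximum to 3 at the end.
import Mathlib
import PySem

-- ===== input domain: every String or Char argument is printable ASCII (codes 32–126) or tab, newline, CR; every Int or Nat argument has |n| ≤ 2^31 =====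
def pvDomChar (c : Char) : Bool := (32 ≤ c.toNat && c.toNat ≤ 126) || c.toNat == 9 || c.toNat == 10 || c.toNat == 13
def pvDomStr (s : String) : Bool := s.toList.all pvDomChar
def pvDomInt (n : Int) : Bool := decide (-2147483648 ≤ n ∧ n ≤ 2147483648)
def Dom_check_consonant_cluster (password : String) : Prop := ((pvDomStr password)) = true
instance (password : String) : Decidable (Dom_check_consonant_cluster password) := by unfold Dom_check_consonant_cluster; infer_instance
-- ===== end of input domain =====

-- B replaces A's one-pass running count/max with two staged passes: a consonant-flag list zipped with its two shifted copies, testing whether any length-3 window is all-consonant; same O(n), alternative decomposition.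
-- ===== PORT A =====
def pvConsonants : List Char := "bcdfghjklmnpqrstvwxyzBCDFGHJKLMNPQRSTVWXYZ".toList

def pvAStep (st : Nat × Nat) (c : Char) : Nat × Nat :=
  if pvConsonants.contains c then (st.1 + 1, max st.2 (st.1 + 1)) else (0, st.2)

def check_consonant_cluster (password : String) : Bool :=
  decide ((password.toList.foldl pvAStep (0, 0)).2 ≥ 3)

-- ===== PORT B =====
def check_consonant_cluster_alt (password : String) : Bool :=
  let flags := password.toList.map (fun c => pvConsonants.contains c)
  ((flags.zip ((PySem.List.slice flags (some 1) none).zip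
      (PySem.List.slice flags (some 2) none))).any fun t => t.1 && t.2.1 && t.2.2)

-- ===== PRECONDITION & SPEC =====
def Spec_check_consonant_cluster (password : String) (out : Bool) : Prop := out = check_consonant_cluster_alt password
instance (password : String) (out : Bool) : Decidable (Spec_check_consonant_cluster password out) := by unfold Spec_check_consonant_cluster; infer_instance

-- ===== CLAIM (what is proved, stated in full; the proofs are below) =====
def Claim_equal_check_consonant_cluster : Prop := ∀ (password : String), Dom_check_consonant_cluster password → Spec_check_consonant_cluster password (check_consonant_cluster password)

-- ===== LEMMAS AND PROOFS =====

-- win3 bs = "some three consecutive flags in bs are all true"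
def pvWin3 : List Bool → Bool
  | a :: b :: c :: r => (a && b && c) || pvWin3 (b :: c :: r)
  | _ => false

theorem pvWin3_false_cons (cs : List Bool) : pvWin3 (false :: cs) = pvWin3 cs := by
  match cs with
  | [] => rfl
  | [b] => rfl
  | b :: c :: r => simp [pvWin3]

theorem pvWin3_tf (cs : List Bool) : pvWin3 (true :: false :: cs) = pvWin3 cs := by
  match cs with
  | [] => rfl
  | c :: r => simp [pvWin3, pvWin3_false_cons]

theorem pvWin3_ttf (cs : List Bool) : pvWin3 (true :: true :: false :: cs) = pvWin3 cs := by
  simp [pvWin3, pvWin3_tf]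

theorem pvWin3_rep_ge (k : Nat) (hk : 3 ≤ k) (cs : List Bool) :
    pvWin3 (List.replicate k true ++ cs) = true := by
  obtain ⟨m, rfl⟩ : ∃ m, k = m + 3 := ⟨k - 3, by omega⟩
  rw [show m + 3 = (m + 2) + 1 from rfl, List.replicate_succ,
      show m + 2 = (m + 1) + 1 from rfl, List.replicate_succ,
      List.replicate_succ]
  simp [pvWin3]

-- B's zip-of-shifts formulation computes pvWin3
theorem pvZip_eq_win3 : ∀ (bs : List Bool),
    ((bs.zip ((bs.drop 1).zip (bs.drop 2))).any fun t => t.1 && t.2.1 && t.2.2) = pvWin3 bs := by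
  intro bs
  match bs with
  | [] => rfl
  | [a] => rfl
  | [a, b] => rfl
  | a :: b :: c :: r =>
      have ih := pvZip_eq_win3 (b :: c :: r)
      simp only [List.drop, List.zip_cons_cons, List.any_cons, pvWin3] at ih ⊢
      rw [ih]

-- A's fold, stated over flags, computes pvWin3 (with the pending run prepended)
theorem pvFold_win3 : ∀ (bs : List Bool) (cnt mx : Nat), cnt ≤ mx →
    (decide ((bs.foldl (fun st b => if b then (st.1 + 1, max st.2 (st.1 + 1)) else (0, st.2)) (cnt, mx)).2 ≥ 3)
      = (decide (mx ≥ 3) || pvWin3 (List.replicate cnt true ++ bs))) := by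
  intro bs
  induction bs with
  | nil =>
      intro cnt mx h
      simp only [List.foldl_nil, List.append_nil]
      by_cases h3 : 3 ≤ cnt
      · have hr := pvWin3_rep_ge cnt h3 []
        rw [List.append_nil] at hr
        simp [hr]
        omega
      · have hr : pvWin3 (List.replicate cnt true) = false := by
          interval_cases cnt <;> rfl
        simp [hr]
  | cons b cs ih =>
      intro cnt mx h
      cases b with
      | true =>
          have key := ih (cnt + 1) (max mx (cnt + 1)) (le_max_right _ _)
          simp only [List.foldl_cons, reduceIte] at key ⊢
          rw [key]
          have hrep : List.replicate cnt true ++ true :: cs = List.replicate (cnt + 1) true ++ cs := by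
            rw [List.replicate_succ']; simp
          rw [hrep]
          by_cases h3 : 3 ≤ cnt + 1
          · simp [pvWin3_rep_ge _ h3 cs]
          · have : max mx (cnt + 1) ≥ 3 ↔ mx ≥ 3 := by omega
            simp [this]
      | false =>
          have key := ih 0 mx (Nat.zero_le _)
          simp only [List.foldl_cons, Bool.false_eq_true, reduceIte] at key ⊢
          rw [key]
          by_cases h3 : 3 ≤ cnt
          · have h3' : mx ≥ 3 := by omega
            simp [h3', pvWin3_rep_ge cnt h3]
          · have : pvWin3 (List.replicate cnt true ++ false :: cs) = pvWin3 cs := by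
              interval_cases cnt <;>
                simp [List.replicate, pvWin3_false_cons, pvWin3_tf, pvWin3_ttf]
            simp [this]

-- ===== VERDICT (by name: the statement is the Claim_ definition above) =====
theorem check_consonant_cluster_spec : Claim_equal_check_consonant_cluster := by
  intro password _
  unfold Spec_check_consonant_cluster check_consonant_cluster
  have halt : check_consonant_cluster_alt password =
      pvWin3 (password.toList.map fun c => pvConsonants.contains c) := by
    rw [← pvZip_eq_win3]
    simp [check_consonant_cluster_alt, pysem]
  rw [halt]
  have hfold : password.toList.foldl pvAStep (0, 0)
      = (password.toList.map fun c => pvConsonants.contains c).foldl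
          (fun st b => if b then (st.1 + 1, max st.2 (st.1 + 1)) else (0, st.2)) (0, 0) := by
    rw [List.foldl_map]
    rfl
  rw [hfold]
  have := pvFold_win3 (password.toList.map fun c => pvConsonants.contains c) 0 0 (le_refl 0)
  simpa using this
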